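-- pv_equiv track=rewrite | github.com/ide-pban/launch_app | component_classifier.py | detect_package_type
-- ===== SOURCE A (Python) =====
-- def detect_package_type(part_number: str, manufacturer: str = '') -> str:
--     """Detect package type (SMD/DIP/BGA)"""
--     part_upper = part_number.upper()
--
--     # BGA patterns
--     bga_patterns = ['BGA', 'FBGA', 'UBGA', 'CBGA']
--     for pattern in bga_patterns:
--         if pattern in part_upper:
--             return '組込(BGA他)'
--
--     # DIP patterns
--     dip_patterns = ['DIP', 'PDIP', 'SOIC', 'SOP', 'SSOP', 'TSSOP', 'QFP', 'LQFP', 'TQFP']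
--     for pattern in dip_patterns:
--         if pattern in part_upper:
--             return 'DIP'
--
--     # Size-based SMD detection (common chip sizes)
--     smd_sizes = ['0201', '0402', '0603', '0805', '1206', '1210', '2010', '2512']
--     for size in smd_sizes:
--         if size in part_upper:
--             return 'SMD'
--
--     # Default to SMD for modern components
--     return 'SMD'
-- ===== SOURCE B (Python) =====
-- def detect_package_type(part_number: str, manufacturer: str = '') -> str:
--     """Detect package type by one left-to-right positional scan.
--
--     Instead of testing whole pattern lists for membership, scan the
--     uppercased string once; at each position mark whether a minimal core
--     token starts there ('BGA' absorbs FBGA/UBGA/CBGA; 'DIP'/'SOIC'/'SOP'/'QFP'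
--     absorb the nine DIP-family patterns), then decide from the two flags.
--     """
--     s = part_number.upper()
--     has_bga = False
--     has_dip = False
--     for i in range(len(s)):
--         if s.startswith('BGA', i):
--             has_bga = True
--         elif s.startswith(('DIP', 'SOIC', 'SOP', 'QFP'), i):
--             has_dip = True
--     if has_bga:
--         return '組込(BGA他)'
--     if has_dip:
--         return 'DIP'
--     return 'SMD'
-- ===== Notes on version B (the rewrite author's own statement) =====
-- stated objective: alternative
-- what changed: Replaces three staged pattern-membership loops with a single positional scan of the uppercased string that sets two boolean flags when a minimal core token ('BGA', or one of 'DIP'/'SOIC'/'SOP'/'QFP', which absorb all nine DIP-family patterns) starts at the current index, deciding from the flags afterwards.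
import Mathlib
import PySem

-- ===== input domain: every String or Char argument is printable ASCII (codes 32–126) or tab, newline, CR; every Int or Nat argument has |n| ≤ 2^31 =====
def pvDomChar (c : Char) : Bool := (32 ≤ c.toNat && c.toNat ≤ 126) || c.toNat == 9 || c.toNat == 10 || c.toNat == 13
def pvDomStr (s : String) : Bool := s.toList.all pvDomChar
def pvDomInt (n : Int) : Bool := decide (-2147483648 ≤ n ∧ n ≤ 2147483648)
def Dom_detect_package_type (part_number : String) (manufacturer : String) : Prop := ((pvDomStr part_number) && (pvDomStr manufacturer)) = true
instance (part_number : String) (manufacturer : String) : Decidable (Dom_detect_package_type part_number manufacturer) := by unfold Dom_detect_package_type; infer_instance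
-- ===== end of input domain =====

-- B replaces A's three staged pattern-membership loops by one positional scan with two
-- flags over a minimal core-token set; equivalence of the return values is proved below.

-- ===== PORT A =====
def detect_package_type (part_number : String) (manufacturer : String) : String :=
  let part_upper := PySem.Str.upper part_number
  if ["BGA", "FBGA", "UBGA", "CBGA"].any (fun p => PySem.Str.isIn p part_upper) then
    "組込(BGA他)"
  else if ["DIP", "PDIP", "SOIC", "SOP", "SSOP", "TSSOP", "QFP", "LQFP", "TQFP"].any
      (fun p => PySem.Str.isIn p part_upper) then
    "DIP"
  else if ["0201", "0402", "0603", "0805", "1206", "1210", "2010", "2512"].any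
      (fun p => PySem.Str.isIn p part_upper) then
    "SMD"
  else
    "SMD"

-- ===== PORT B =====
-- loop body of Source B's scan: s.startswith(pat, i) for 0 ≤ i is exactly
-- 'pat is a prefix of the character list dropped at i' (exact on that range).
def altStep (l : List Char) (acc : Bool × Bool) (i : Int) : Bool × Bool :=
  if PySem.Chars.startswith (l.drop i.toNat) "BGA".toList then (true, acc.2)
  else if ["DIP", "SOIC", "SOP", "QFP"].any
      (fun p => PySem.Chars.startswith (l.drop i.toNat) p.toList) then (acc.1, true)
  else acc

def detect_package_type_alt (part_number : String) (manufacturer : String) : String :=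
  let l := (PySem.Str.upper part_number).toList
  let r := (PySem.List.pyRange 0 (l.length : Int) 1).foldl (altStep l) (false, false)
  if r.1 then "組込(BGA他)"
  else if r.2 then "DIP"
  else "SMD"

-- ===== PRECONDITION & SPEC =====
def Spec_detect_package_type (part_number : String) (manufacturer : String) (out : String) : Prop := out = detect_package_type_alt part_number manufacturer
instance (part_number : String) (manufacturer : String) (out : String) : Decidable (Spec_detect_package_type part_number manufacturer out) := by unfold Spec_detect_package_type; infer_instance

-- ===== CLAIM (what is proved, stated in full; the proofs are below) =====
def Claim_equal_detect_package_type : Prop := ∀ (part_number : String) (manufacturer : String), Dom_detect_package_type part_number manufacturer → Spec_detect_package_type part_number manufacturer (detect_package_type part_number manufacturer)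

-- ===== LEMMAS AND PROOFS =====

-- the scan's fold computes the two 'any' flags
lemma altStep_eq (l : List Char) (b d : Bool) (i : Int) :
    altStep l (b, d) i =
      (b || PySem.Chars.startswith (l.drop i.toNat) "BGA".toList,
       d || (!PySem.Chars.startswith (l.drop i.toNat) "BGA".toList &&
         ["DIP", "SOIC", "SOP", "QFP"].any
           (fun p => PySem.Chars.startswith (l.drop i.toNat) p.toList))) := by
  unfold altStep
  cases hb : PySem.Chars.startswith (l.drop i.toNat) "BGA".toList
  · cases hd : ["DIP", "SOIC", "SOP", "QFP"].any
        (fun p => PySem.Chars.startswith (l.drop i.toNat) p.toList)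
    · simp [hd]
    · simp [hd]
  · simp

lemma altStep_foldl (l : List Char) (idxs : List Int) (b d : Bool) :
    idxs.foldl (altStep l) (b, d) =
      (b || idxs.any (fun i => PySem.Chars.startswith (l.drop i.toNat) "BGA".toList),
       d || idxs.any (fun i =>
          !PySem.Chars.startswith (l.drop i.toNat) "BGA".toList &&
          ["DIP", "SOIC", "SOP", "QFP"].any
            (fun p => PySem.Chars.startswith (l.drop i.toNat) p.toList))) := by
  induction idxs generalizing b d with
  | nil => simp
  | cons i rest ih =>
    rw [List.foldl_cons, altStep_eq, ih]
    simp [Bool.or_assoc]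

-- a nonempty pattern occurs in l iff it starts at some scanned position i < l.length
lemma isIn_iff_exists_lt (l : List Char) (sub : List Char) (hne : sub ≠ []) :
    PySem.Chars.isIn sub l = true ↔
      ∃ j : Nat, j < l.length ∧ sub <+: l.drop j := by
  rw [← PySem.Chars.exists_prefix_drop_iff_isIn]
  constructor
  · rintro ⟨j, hj⟩
    refine ⟨j, ?_, hj⟩
    by_contra h
    have hdrop : l.drop j = [] := List.drop_eq_nil_of_le (by omega)
    rw [hdrop, List.prefix_nil] at hj
    exact hne hj
  · rintro ⟨j, _, hj⟩; exact ⟨j, hj⟩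

-- the 'any' over the scanned range, as a Chars.isIn test
lemma any_pyRange_startswith (l : List Char) (sub : List Char) (hne : sub ≠ []) :
    ((PySem.List.pyRange 0 (l.length : Int) 1).any
        (fun i => PySem.Chars.startswith (l.drop i.toNat) sub))
      = PySem.Chars.isIn sub l := by
  rw [Bool.eq_iff_iff, List.any_eq_true, isIn_iff_exists_lt l sub hne]
  constructor
  · rintro ⟨i, hi, hsw⟩
    rw [PySem.List.mem_pyRange_one] at hi
    refine ⟨i.toNat, by omega, ?_⟩
    exact (PySem.Chars.startswith_iff _ _).mp hsw
  · rintro ⟨j, hj, hpre⟩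
    refine ⟨(j : Int), ?_, ?_⟩
    · rw [PySem.List.mem_pyRange_one]; omega
    · simpa [PySem.Chars.startswith_iff] using hpre

-- the four BGA patterns reduce to the core 'BGA'
lemma bga_group (u : String) :
    (["BGA", "FBGA", "UBGA", "CBGA"].any (fun p => PySem.Str.isIn p u))
      = PySem.Chars.isIn "BGA".toList u.toList := by
  rw [Bool.eq_iff_iff, List.any_eq_true]
  simp only [List.mem_cons, List.not_mem_nil, or_false, PySem.Str.isIn_iff_infix,
    PySem.Chars.isIn_iff_infix]
  constructor
  · rintro ⟨p, hp, hinf⟩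
    rcases hp with rfl | rfl | rfl | rfl
    · exact hinf
    all_goals exact List.IsInfix.trans (by decide) hinf
  · intro h; exact ⟨"BGA", Or.inl rfl, h⟩

-- the nine DIP-family patterns reduce to the four cores
lemma dip_group (u : String) :
    (["DIP", "PDIP", "SOIC", "SOP", "SSOP", "TSSOP", "QFP", "LQFP", "TQFP"].any
        (fun p => PySem.Str.isIn p u))
      = (["DIP", "SOIC", "SOP", "QFP"].any
        (fun p => PySem.Chars.isIn p.toList u.toList)) := by
  rw [Bool.eq_iff_iff, List.any_eq_true, List.any_eq_true]
  simp only [List.mem_cons, List.not_mem_nil, or_false, PySem.Str.isIn_iff_infix,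
    PySem.Chars.isIn_iff_infix]
  constructor
  · rintro ⟨p, hp, hinf⟩
    rcases hp with rfl | rfl | rfl | rfl | rfl | rfl | rfl | rfl | rfl
    · exact ⟨"DIP", by simp, hinf⟩
    · exact ⟨"DIP", by simp, List.IsInfix.trans (by decide) hinf⟩
    · exact ⟨"SOIC", by simp, hinf⟩
    · exact ⟨"SOP", by simp, hinf⟩
    · exact ⟨"SOP", by simp, List.IsInfix.trans (by decide) hinf⟩
    · exact ⟨"SOP", by simp, List.IsInfix.trans (by decide) hinf⟩
    · exact ⟨"QFP", by simp, hinf⟩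
    · exact ⟨"QFP", by simp, List.IsInfix.trans (by decide) hinf⟩
    · exact ⟨"QFP", by simp, List.IsInfix.trans (by decide) hinf⟩
  · rintro ⟨p, hp, hinf⟩
    rcases hp with rfl | rfl | rfl | rfl
    · exact ⟨"DIP", by simp, hinf⟩
    · exact ⟨"SOIC", by simp, hinf⟩
    · exact ⟨"SOP", by simp, hinf⟩
    · exact ⟨"QFP", by simp, hinf⟩

lemma core_eq (u : String) :
    (if ["BGA", "FBGA", "UBGA", "CBGA"].any (fun p => PySem.Str.isIn p u) then "組込(BGA他)"
     else if ["DIP", "PDIP", "SOIC", "SOP", "SSOP", "TSSOP", "QFP", "LQFP", "TQFP"].any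
         (fun p => PySem.Str.isIn p u) then "DIP"
     else if ["0201", "0402", "0603", "0805", "1206", "1210", "2010", "2512"].any
         (fun p => PySem.Str.isIn p u) then "SMD"
     else "SMD")
    = (if ((PySem.List.pyRange 0 (u.toList.length : Int) 1).foldl
            (altStep u.toList) (false, false)).1 then "組込(BGA他)"
       else if ((PySem.List.pyRange 0 (u.toList.length : Int) 1).foldl
            (altStep u.toList) (false, false)).2 then "DIP"
       else "SMD") := by
  rw [altStep_foldl, any_pyRange_startswith u.toList "BGA".toList (by decide), bga_group u]
  cases hb : PySem.Chars.isIn "BGA".toList u.toList with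
  | true => simp
  | false =>
    have hnopre : ∀ j : Nat, ¬ ("BGA".toList <+: u.toList.drop j) := by
      intro j hpre
      have h2 := (PySem.Chars.exists_prefix_drop_iff_isIn "BGA".toList u.toList).mp ⟨j, hpre⟩
      rw [hb] at h2
      exact absurd h2 (by decide)
    have hdip : ((PySem.List.pyRange 0 (u.toList.length : Int) 1).any (fun i =>
          !PySem.Chars.startswith (u.toList.drop i.toNat) "BGA".toList &&
          ["DIP", "SOIC", "SOP", "QFP"].any
            (fun p => PySem.Chars.startswith (u.toList.drop i.toNat) p.toList)))
        = (["DIP", "SOIC", "SOP", "QFP"].any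
            (fun p => PySem.Chars.isIn p.toList u.toList)) := by
      rw [Bool.eq_iff_iff, List.any_eq_true, List.any_eq_true]
      constructor
      · rintro ⟨i, hi, hcond⟩
        rw [Bool.and_eq_true, List.any_eq_true] at hcond
        obtain ⟨-, p, hp, hsw⟩ := hcond
        refine ⟨p, hp, ?_⟩
        exact (PySem.Chars.exists_prefix_drop_iff_isIn _ _).mp
          ⟨i.toNat, (PySem.Chars.startswith_iff _ _).mp hsw⟩
      · rintro ⟨p, hp, hin⟩
        have hne : p.toList ≠ [] := by
          simp only [List.mem_cons, List.not_mem_nil, or_false] at hp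
          rcases hp with rfl | rfl | rfl | rfl <;> decide
        obtain ⟨j, hj, hpre⟩ := (isIn_iff_exists_lt u.toList p.toList hne).mp hin
        refine ⟨(j : Int), by rw [PySem.List.mem_pyRange_one]; omega, ?_⟩
        rw [Bool.and_eq_true, List.any_eq_true]
        refine ⟨?_, p, hp, by simpa [PySem.Chars.startswith_iff] using hpre⟩
        simp only [Bool.not_eq_eq_eq_not, Bool.not_true, Int.toNat_natCast]
        rw [← Bool.not_eq_true]
        intro hsw
        exact hnopre j ((PySem.Chars.startswith_iff _ _).mp hsw)
    rw [dip_group u, hdip]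
    cases hd : (["DIP", "SOIC", "SOP", "QFP"].any
        (fun p => PySem.Chars.isIn p.toList u.toList)) with
    | true => simp
    | false => simp

-- ===== VERDICT (by name: the statement is the Claim_ definition above) =====
theorem detect_package_type_spec : Claim_equal_detect_package_type := by
  intro part_number manufacturer _
  show detect_package_type part_number manufacturer
      = detect_package_type_alt part_number manufacturer
  exact core_eq (PySem.Str.upper part_number)
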